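-- pv_equiv track=rewrite | github.com/DerivedFunction01/sec-nlp | defs/table_processor.py | _detect_merge_patterns
-- ===== SOURCE A (Python) =====
-- from typing import List, Dict, Optional, Set, Tuple
--
-- PREFIX_SYMBOLS = set()
--
-- SUFFIX_SYMBOLS = set()
--
-- def _detect_merge_patterns(
--     raw_rows: List[List[str]], sparse_columns: set
-- ) -> Dict[int, str]:
--     """Detect if sparse columns should merge left or right"""
--     merge_directions = {}
--
--     for col_idx in sparse_columns:
--         col_patterns = set()
--
--         for row in raw_rows:
--             if col_idx < len(row) and row[col_idx].strip():
--                 val = row[col_idx].strip()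
--                 if val in PREFIX_SYMBOLS:
--                     col_patterns.add("prefix")
--                 elif val in SUFFIX_SYMBOLS:
--                     col_patterns.add("suffix")
--                 elif val == "(":
--                     col_patterns.add("prefix_paren")
--                 elif val == ")":
--                     col_patterns.add("suffix_paren")
--                 elif val == "%":
--                     col_patterns.add("suffix_percent")
--                 else:
--                     col_patterns.add("other")
--
--         if not col_patterns:
--             continue
--
--         has_prefix = "prefix" in col_patterns or "prefix_paren" in col_patterns
--         has_suffix = (
--             "suffix" in col_patterns
--             or "suffix_paren" in col_patterns
--             or "suffix_percent" in col_patterns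
--         )
--         has_other = "other" in col_patterns
--
--         if has_prefix and not has_suffix and not has_other:
--             merge_directions[col_idx] = "merge_right"
--         elif has_suffix and not has_prefix and not has_other:
--             merge_directions[col_idx] = "merge_left"
--         else:
--             merge_directions[col_idx] = "skip"
--
--     return merge_directions
-- ===== SOURCE B (Python) =====
-- from typing import List, Dict
--
-- PREFIX_SYMBOLS = set()
--
-- SUFFIX_SYMBOLS = set()
--
--
-- def _is_prefix(v):
--     return v in PREFIX_SYMBOLS or v == "("
--
--
-- def _is_suffix(v):
--     return v not in PREFIX_SYMBOLS and (v in SUFFIX_SYMBOLS or v == ")" or v == "%")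
--
--
-- def _detect_merge_patterns(
--     raw_rows: List[List[str]], sparse_columns: set
-- ) -> Dict[int, str]:
--     """Quantifier formulation: no pattern-label sets are built.  A column
--     merges right iff every nonempty cell in it is a prefix symbol, merges
--     left iff every nonempty cell is a suffix symbol, otherwise skips."""
--     merge_directions = {}
--     for col_idx in sparse_columns:
--         vals = [v for row in raw_rows if col_idx < len(row)
--                 for v in (row[col_idx].strip(),) if v]
--         if not vals:
--             continue
--         if all(_is_prefix(v) for v in vals):
--             merge_directions[col_idx] = "merge_right"
--         elif all(_is_suffix(v) for v in vals):
--             merge_directions[col_idx] = "merge_left"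
--         else:
--             merge_directions[col_idx] = "skip"
--     return merge_directions
-- ===== Notes on version B (the rewrite author's own statement) =====
-- stated objective: alternative
-- what changed: Replaces A's accumulated pattern-label sets and three derived has_prefix/has_suffix/has_other flags by a quantifier formulation: per column it collects the nonempty stripped cells once and decides merge_right/merge_left/skip by short-circuit all() tests with prefix/suffix predicates, building no sets and no labels at all.
import Mathlib
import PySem

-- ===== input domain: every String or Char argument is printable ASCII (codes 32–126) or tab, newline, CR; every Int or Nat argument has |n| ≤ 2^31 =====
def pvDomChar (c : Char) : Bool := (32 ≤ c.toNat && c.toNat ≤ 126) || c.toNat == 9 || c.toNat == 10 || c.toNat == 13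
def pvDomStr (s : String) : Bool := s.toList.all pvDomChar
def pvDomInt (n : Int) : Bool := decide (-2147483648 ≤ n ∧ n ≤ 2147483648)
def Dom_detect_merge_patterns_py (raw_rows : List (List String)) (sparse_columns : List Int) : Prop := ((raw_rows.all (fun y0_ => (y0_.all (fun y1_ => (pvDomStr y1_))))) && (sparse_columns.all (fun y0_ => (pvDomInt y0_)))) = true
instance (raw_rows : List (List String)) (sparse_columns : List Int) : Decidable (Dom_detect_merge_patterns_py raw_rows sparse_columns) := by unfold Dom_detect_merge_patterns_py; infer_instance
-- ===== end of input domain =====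

-- B replaces A's accumulated pattern-label sets and derived has_prefix/has_suffix/has_other flags
-- by a quantifier formulation (all nonempty cells prefix / all suffix per column); same cost.


-- module constants (both sources share them): PREFIX_SYMBOLS = set(), SUFFIX_SYMBOLS = set()
def pvPrefixSymbols : PySem.Set String := PySem.Set.ofList []
def pvSuffixSymbols : PySem.Set String := PySem.Set.ofList []

-- ===== PORT A =====
def detect_merge_patterns_py (raw_rows : List (List String)) (sparse_columns : List Int) : List (Int × String) :=
  (sparse_columns.foldl (fun (md : PySem.Dict Int String) col_idx =>
    let col_patterns : PySem.Set String :=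
      raw_rows.foldl (fun (pats : PySem.Set String) row =>
        if col_idx < (row.length : Int) then
          match PySem.List.pyGet? row col_idx with
          | none => pats  -- Python raises IndexError here; excluded by Pre_
          | some cell =>
            let val := PySem.Str.strip cell
            if val ≠ "" then
              PySem.Set.add pats
                (if PySem.Set.contains pvPrefixSymbols val then "prefix"
                 else if PySem.Set.contains pvSuffixSymbols val then "suffix"
                 else if val = "(" then "prefix_paren"
                 else if val = ")" then "suffix_paren"
                 else if val = "%" then "suffix_percent"
                 else "other")
            else pats
        else pats) PySem.Set.empty
    if col_patterns = PySem.Set.empty then md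
    else
      let has_prefix := PySem.Set.contains col_patterns "prefix" || PySem.Set.contains col_patterns "prefix_paren"
      let has_suffix := PySem.Set.contains col_patterns "suffix" || PySem.Set.contains col_patterns "suffix_paren" || PySem.Set.contains col_patterns "suffix_percent"
      let has_other := PySem.Set.contains col_patterns "other"
      if has_prefix && !has_suffix && !has_other then md.insert col_idx "merge_right"
      else if has_suffix && !has_prefix && !has_other then md.insert col_idx "merge_left"
      else md.insert col_idx "skip") PySem.Dict.empty).items

-- ===== PORT B =====
def pvIsPrefix (v : String) : Bool :=
  PySem.Set.contains pvPrefixSymbols v || v == "("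

def pvIsSuffix (v : String) : Bool :=
  !PySem.Set.contains pvPrefixSymbols v &&
    (PySem.Set.contains pvSuffixSymbols v || v == ")" || v == "%")

-- the nonempty stripped cells of one sparse column (B's list comprehension)
def pvVals (raw_rows : List (List String)) (col_idx : Int) : List String :=
  raw_rows.filterMap (fun row =>
    if col_idx < (row.length : Int) then
      match PySem.List.pyGet? row col_idx with
      | none => none  -- Python raises IndexError here; excluded by Pre_
      | some cell =>
        let v := PySem.Str.strip cell
        if v ≠ "" then some v else none
    else none)

def detect_merge_patterns_py_alt (raw_rows : List (List String)) (sparse_columns : List Int) : List (Int × String) :=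
  (sparse_columns.foldl (fun (md : PySem.Dict Int String) col_idx =>
    let vals := pvVals raw_rows col_idx
    if vals = [] then md
    else if vals.all pvIsPrefix then md.insert col_idx "merge_right"
    else if vals.all pvIsSuffix then md.insert col_idx "merge_left"
    else md.insert col_idx "skip") PySem.Dict.empty).items

-- ===== PRECONDITION & SPEC =====
-- Pre_ excludes exactly the inputs where Python raises IndexError: a negative sparse column whose
-- wrapped index falls outside some row (both A and B index row[col_idx] and raise there alike).
def Pre_detect_merge_patterns_py (raw_rows : List (List String)) (sparse_columns : List Int) : Prop :=
  ∀ c ∈ sparse_columns, c < 0 → ∀ row ∈ raw_rows, -c ≤ (row.length : Int)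
instance (raw_rows : List (List String)) (sparse_columns : List Int) : Decidable (Pre_detect_merge_patterns_py raw_rows sparse_columns) := by unfold Pre_detect_merge_patterns_py; infer_instance

def pvWitness_detect_merge_patterns_py : List (List String) × List Int :=
  ([["(", "1"], [" ", "2"]], [0, 1])

def Spec_detect_merge_patterns_py (raw_rows : List (List String)) (sparse_columns : List Int) (out : List (Int × String)) : Prop := out = detect_merge_patterns_py_alt raw_rows sparse_columns
instance (raw_rows : List (List String)) (sparse_columns : List Int) (out : List (Int × String)) : Decidable (Spec_detect_merge_patterns_py raw_rows sparse_columns out) := by unfold Spec_detect_merge_patterns_py; infer_instance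

-- ===== CLAIM (what is proved, stated in full; the proofs are below) =====
def Claim_equal_detect_merge_patterns_py : Prop := ∀ (raw_rows : List (List String)) (sparse_columns : List Int), Dom_detect_merge_patterns_py raw_rows sparse_columns → Pre_detect_merge_patterns_py raw_rows sparse_columns → Spec_detect_merge_patterns_py raw_rows sparse_columns (detect_merge_patterns_py raw_rows sparse_columns)

-- ===== LEMMAS AND PROOFS =====

-- the nonempty stripped value (if any) of one cell
def pvVal (row : List String) (c : Int) : Option String :=
  if c < (row.length : Int) then
    match PySem.List.pyGet? row c with
    | none => none
    | some cell =>
      let v := PySem.Str.strip cell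
      if v ≠ "" then some v else none
  else none

def pvClassify (v : String) : String :=
  if PySem.Set.contains pvPrefixSymbols v then "prefix"
  else if PySem.Set.contains pvSuffixSymbols v then "suffix"
  else if v = "(" then "prefix_paren"
  else if v = ")" then "suffix_paren"
  else if v = "%" then "suffix_percent"
  else "other"

-- A's per-row step at a fixed column, through pvVal
def pvStepA (c : Int) (pats : PySem.Set String) (row : List String) : PySem.Set String :=
  match pvVal row c with
  | some v => PySem.Set.add pats (pvClassify v)
  | none => pats

theorem pvA_body_eq (c : Int) :
    (fun (pats : PySem.Set String) (row : List String) =>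
      if c < (row.length : Int) then
        match PySem.List.pyGet? row c with
        | none => pats
        | some cell =>
          let val := PySem.Str.strip cell
          if val ≠ "" then
            PySem.Set.add pats
              (if PySem.Set.contains pvPrefixSymbols val then "prefix"
               else if PySem.Set.contains pvSuffixSymbols val then "suffix"
               else if val = "(" then "prefix_paren"
               else if val = ")" then "suffix_paren"
               else if val = "%" then "suffix_percent"
               else "other")
          else pats
      else pats) = pvStepA c := by
  funext pats row
  unfold pvStepA pvVal
  split_ifs with h
  · cases PySem.List.pyGet? row c with
    | none => rfl
    | some cell =>
      simp only
      by_cases hne : PySem.Str.strip cell ≠ ""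
      · rw [if_pos hne, if_pos hne]; rfl
      · rw [if_neg hne, if_neg hne]
  · rfl

theorem pvVals_eq (raw_rows : List (List String)) (c : Int) :
    pvVals raw_rows c = raw_rows.filterMap (fun row => pvVal row c) := by
  unfold pvVals pvVal; rfl

-- A's pattern set is the classify-fold over B's value list
theorem pvFold_eq (c : Int) :
    ∀ (rows : List (List String)) (s : PySem.Set String),
    rows.foldl (pvStepA c) s =
      (rows.filterMap (fun row => pvVal row c)).foldl
        (fun s v => PySem.Set.add s (pvClassify v)) s := by
  intro rows
  induction rows with
  | nil => intro s; rfl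
  | cons r rows ih =>
    intro s
    rw [List.foldl_cons, List.filterMap_cons]
    cases h : pvVal r c with
    | none => simp only [pvStepA, h]; exact ih s
    | some v => simp only [pvStepA, h, List.foldl_cons]; exact ih _

theorem pvAdd_ne_nil (s : PySem.Set String) (l : String) : PySem.Set.add s l ≠ [] := by
  rw [PySem.Set.add_eq_ite]
  split_ifs with h
  · intro hn; rw [hn] at h; simp at h
  · simp

-- emptiness of the classify-fold
theorem pvLabFold_nil_iff (vals : List String) :
    (vals.foldl (fun s v => PySem.Set.add s (pvClassify v)) PySem.Set.empty = []) ↔ vals = [] := by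
  cases vals with
  | nil => simp [PySem.Set.empty]
  | cons v vals =>
    simp only [List.foldl_cons]
    constructor
    · intro h
      exfalso
      have : ∀ (l : List String) (s : PySem.Set String), s ≠ [] →
          l.foldl (fun s v => PySem.Set.add s (pvClassify v)) s ≠ [] := by
        intro l
        induction l with
        | nil => intro s hs; exact hs
        | cons x xs ih => intro s hs; exact ih _ (pvAdd_ne_nil s (pvClassify x))
      exact this vals _ (pvAdd_ne_nil _ _) h
    · intro h; cases h

-- membership in the classify-fold
theorem pvLabFold_mem (l : String) :
    ∀ (vals : List String) (s : PySem.Set String),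
    (l ∈ vals.foldl (fun s v => PySem.Set.add s (pvClassify v)) s) ↔
      l ∈ s ∨ ∃ v ∈ vals, pvClassify v = l := by
  intro vals
  induction vals with
  | nil => intro s; simp
  | cons v vals ih =>
    intro s
    rw [List.foldl_cons, ih]
    rw [PySem.Set.mem_add]
    constructor
    · rintro (⟨h | h⟩ | ⟨w, hw, hc⟩)
      · exact Or.inl h
      · exact Or.inr ⟨v, List.mem_cons_self .., h.symm⟩
      · exact Or.inr ⟨w, List.mem_cons_of_mem _ hw, hc⟩
    · rintro (h | ⟨w, hw, hc⟩)
      · exact Or.inl (Or.inl h)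
      · rcases List.mem_cons.mp hw with h | h
        · subst h; exact Or.inl (Or.inr hc.symm)
        · exact Or.inr ⟨w, h, hc⟩

-- with the empty symbol sets, classify is a plain three-way string test
theorem pvClassify_eq (v : String) :
    pvClassify v =
      (if v = "(" then "prefix_paren"
       else if v = ")" then "suffix_paren"
       else if v = "%" then "suffix_percent"
       else "other") := by
  unfold pvClassify pvPrefixSymbols pvSuffixSymbols
  simp [PySem.Set.ofList]

-- a nonempty list whose elements fall in exactly one of the classes p / q / neither:
-- 'some p, no q, no neither' is the same as 'all p' (and symmetrically)
theorem pvTri {α : Type} (p q : α → Bool) (hd : ∀ v, !(p v && q v) = true)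
    (vals : List α) (hne : vals ≠ []) :
    (vals.any p && !vals.any q && !(vals.any (fun v => !p v && !q v))) = vals.all p := by
  rw [Bool.eq_iff_iff, Bool.and_eq_true, Bool.and_eq_true, Bool.not_eq_true',
    Bool.not_eq_true', List.any_eq_true, List.any_eq_false, List.any_eq_false,
    List.all_eq_true]
  constructor
  · rintro ⟨⟨-, hq⟩, ho⟩ v hv
    have h1 := hq v hv
    have h2 := ho v hv
    cases hp : p v
    · exfalso
      apply h2
      rw [hp]
      cases hqv : q v
      · rfl
      · exact absurd hqv h1
    · rfl
  · intro hall
    obtain ⟨w, hw⟩ := List.exists_mem_of_ne_nil vals hne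
    refine ⟨⟨⟨w, hw, hall w hw⟩, fun v hv => ?_⟩, fun v hv => ?_⟩
    · have hd' := hd v
      rw [hall v hv] at hd'
      intro hqv
      rw [hqv] at hd'
      exact absurd hd' (by decide)
    · intro hx
      rw [hall v hv] at hx
      rw [Bool.not_true, Bool.false_and] at hx
      exact absurd hx (by decide)

-- per-column equality of the two fold bodies
theorem pvStep_eq (raw_rows : List (List String)) :
    (fun (md : PySem.Dict Int String) (col_idx : Int) =>
      let col_patterns : PySem.Set String :=
        raw_rows.foldl (fun (pats : PySem.Set String) row =>
          if col_idx < (row.length : Int) then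
            match PySem.List.pyGet? row col_idx with
            | none => pats
            | some cell =>
              let val := PySem.Str.strip cell
              if val ≠ "" then
                PySem.Set.add pats
                  (if PySem.Set.contains pvPrefixSymbols val then "prefix"
                   else if PySem.Set.contains pvSuffixSymbols val then "suffix"
                   else if val = "(" then "prefix_paren"
                   else if val = ")" then "suffix_paren"
                   else if val = "%" then "suffix_percent"
                   else "other")
              else pats
          else pats) PySem.Set.empty
      if col_patterns = PySem.Set.empty then md
      else
        let has_prefix := PySem.Set.contains col_patterns "prefix" || PySem.Set.contains col_patterns "prefix_paren"
        let has_suffix := PySem.Set.contains col_patterns "suffix" || PySem.Set.contains col_patterns "suffix_paren" || PySem.Set.contains col_patterns "suffix_percent"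
        let has_other := PySem.Set.contains col_patterns "other"
        if has_prefix && !has_suffix && !has_other then md.insert col_idx "merge_right"
        else if has_suffix && !has_prefix && !has_other then md.insert col_idx "merge_left"
        else md.insert col_idx "skip") =
    (fun (md : PySem.Dict Int String) (col_idx : Int) =>
      let vals := pvVals raw_rows col_idx
      if vals = [] then md
      else if vals.all pvIsPrefix then md.insert col_idx "merge_right"
      else if vals.all pvIsSuffix then md.insert col_idx "merge_left"
      else md.insert col_idx "skip") := by
  funext md c
  simp only [pvA_body_eq c, pvFold_eq c raw_rows PySem.Set.empty, ← pvVals_eq]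
  set vals := pvVals raw_rows c with hv
  set P := vals.foldl (fun s v => PySem.Set.add s (pvClassify v)) PySem.Set.empty with hP
  by_cases hnil : vals = []
  · have : P = PySem.Set.empty := by rw [hP, hnil]; rfl
    simp [this, hnil]
  · have hPne : ¬ (P = PySem.Set.empty) := by
      intro h; exact hnil ((pvLabFold_nil_iff vals).mp h)
    rw [if_neg hPne, if_neg hnil]
    have hmem : ∀ l, PySem.Set.contains P l = true ↔ ∃ v ∈ vals, pvClassify v = l := by
      intro l
      rw [PySem.Set.contains_iff, hP, pvLabFold_mem]
      simp [PySem.Set.empty]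
    have hp : (PySem.Set.contains P "prefix" || PySem.Set.contains P "prefix_paren") =
        vals.any (fun v => v == "(") := by
      rw [Bool.eq_iff_iff]
      simp only [Bool.or_eq_true, hmem, List.any_eq_true, beq_iff_eq]
      constructor
      · rintro (⟨v, hv', hc⟩ | ⟨v, hv', hc⟩) <;>
          (rw [pvClassify_eq] at hc; refine ⟨v, hv', ?_⟩;
            by_cases h1 : v = "(" <;> by_cases h2 : v = ")" <;> by_cases h3 : v = "%" <;>
              simp_all)
      · rintro ⟨v, hv', hc⟩
        right; exact ⟨v, hv', by rw [pvClassify_eq, if_pos hc]⟩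
    have hs : (PySem.Set.contains P "suffix" || PySem.Set.contains P "suffix_paren" ||
          PySem.Set.contains P "suffix_percent") =
        vals.any (fun v => v == ")" || v == "%") := by
      rw [Bool.eq_iff_iff]
      simp only [Bool.or_eq_true, hmem, List.any_eq_true, beq_iff_eq]
      constructor
      · rintro ((⟨v, hv', hc⟩ | ⟨v, hv', hc⟩) | ⟨v, hv', hc⟩) <;>
          (rw [pvClassify_eq] at hc; refine ⟨v, hv', ?_⟩;
            by_cases h1 : v = "(" <;> by_cases h2 : v = ")" <;> by_cases h3 : v = "%" <;>
              simp_all)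
      · rintro ⟨v, hv', hc⟩
        rcases hc with hc | hc
        · left; right
          exact ⟨v, hv', by rw [pvClassify_eq, if_neg (by rw [hc]; decide), if_pos hc]⟩
        · right
          exact ⟨v, hv', by rw [pvClassify_eq, if_neg (by rw [hc]; decide),
            if_neg (by rw [hc]; decide), if_pos hc]⟩
    have ho : PySem.Set.contains P "other" =
        vals.any (fun v => !(v == "(") && !(v == ")") && !(v == "%")) := by
      rw [Bool.eq_iff_iff]
      simp only [hmem, List.any_eq_true, Bool.and_eq_true, Bool.not_eq_true', beq_eq_false_iff_ne]
      constructor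
      · rintro ⟨v, hv', hc⟩
        rw [pvClassify_eq] at hc
        refine ⟨v, ?_⟩
        by_cases h1 : v = "(" <;> by_cases h2 : v = ")" <;> by_cases h3 : v = "%" <;> simp_all
      · rintro ⟨v, hv', ⟨h1, h2⟩, h3⟩
        exact ⟨v, hv', by rw [pvClassify_eq, if_neg h1, if_neg h2, if_neg h3]⟩
    simp only [hp, hs, ho]
    -- the trichotomy: with a nonempty vals the three flags collapse to all-tests
    have hpre : ∀ v, pvIsPrefix v = (v == "(") := by
      intro v; unfold pvIsPrefix pvPrefixSymbols; simp [PySem.Set.ofList]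
    have hsuf : ∀ v, pvIsSuffix v = (v == ")" || v == "%") := by
      intro v; unfold pvIsSuffix pvPrefixSymbols pvSuffixSymbols; simp [PySem.Set.ofList]
    have hpre' : pvIsPrefix = (fun (v : String) => v == "(") := by
      funext v; unfold pvIsPrefix pvPrefixSymbols; simp [PySem.Set.ofList]
    have hsuf' : pvIsSuffix = (fun (v : String) => v == ")" || v == "%") := by
      funext v; unfold pvIsSuffix pvPrefixSymbols pvSuffixSymbols; simp [PySem.Set.ofList]
    have hop : (fun (v : String) => !(v == "(") && !(v == ")") && !(v == "%")) =
        (fun (v : String) => !(v == "(") && !(v == ")" || v == "%")) := by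
      funext v; cases v == "(" <;> cases v == ")" <;> cases v == "%" <;> rfl
    have hdR : ∀ (v : String), !((v == "(") && (v == ")" || v == "%")) = true := by
      intro v
      by_cases h1 : v = "("
      · subst h1; decide
      · simp [h1]
    have hdL : ∀ (v : String), !((v == ")" || v == "%") && (v == "(")) = true := by
      intro v
      by_cases h1 : v = "("
      · subst h1; decide
      · simp [h1]
    rw [hpre', hsuf', hop]
    rw [pvTri (fun v => v == "(") (fun v => v == ")" || v == "%") hdR vals hnil]
    have : (fun (v : String) => !(v == "(") && !(v == ")" || v == "%")) =
        (fun (v : String) => !(v == ")" || v == "%") && !(v == "(")) := by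
      funext v; cases v == "(" <;> cases (v == ")" || v == "%") <;> simp_all
    rw [this, pvTri (fun v => v == ")" || v == "%") (fun v => v == "(") hdL vals hnil]

-- ===== VERDICT (by name: the statement is the Claim_ definition above) =====
theorem detect_merge_patterns_py_spec : Claim_equal_detect_merge_patterns_py := by
  intro raw_rows sparse_columns _hdom _hpre
  unfold Spec_detect_merge_patterns_py detect_merge_patterns_py detect_merge_patterns_py_alt
  rw [pvStep_eq raw_rows]
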